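-- pv_equiv track=rewrite | github.com/pypi-data/pypi-mirror-239 | packages/aai-engine/aai_engine-0.0.28-py3-none-any.whl/aai_engine_package/engine_util.py | _stepping_find
-- ===== SOURCE A (Python) =====
-- def _stepping_find(needle, haystack, step):
--     """
--     TODO
--     """
--     for start_pos in range(0, len(haystack) - len(needle) + 1):
--         found_match = True
--         for pos in range(0, len(needle), step):
--             if haystack[start_pos + pos] != needle[pos]:
--                 found_match = False
--                 break
--         if found_match:
--             yield start_pos
-- ===== SOURCE B (Python) =====
-- def _stepping_find(needle, haystack, step):
--     # Loop-interchanged: sweep each checked pattern offset once across a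
--     # candidate-mask of all start positions, then yield the survivors.
--     ok = [True] * (len(haystack) - len(needle) + 1)
--     if not ok:
--         return
--     for p in range(0, len(needle), step):
--         c = needle[p]
--         ok = [good and haystack[s + p] == c for s, good in enumerate(ok)]
--     for s, good in enumerate(ok):
--         if good:
--             yield s
-- ===== Notes on version B (the rewrite author's own statement) =====
-- stated objective: alternative
-- what changed: Loop interchange: instead of testing every checked pattern offset per start position with an early break, B sweeps each checked offset once over a boolean mask of all candidate start positions and yields the surviving indices.
import Mathlib
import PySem

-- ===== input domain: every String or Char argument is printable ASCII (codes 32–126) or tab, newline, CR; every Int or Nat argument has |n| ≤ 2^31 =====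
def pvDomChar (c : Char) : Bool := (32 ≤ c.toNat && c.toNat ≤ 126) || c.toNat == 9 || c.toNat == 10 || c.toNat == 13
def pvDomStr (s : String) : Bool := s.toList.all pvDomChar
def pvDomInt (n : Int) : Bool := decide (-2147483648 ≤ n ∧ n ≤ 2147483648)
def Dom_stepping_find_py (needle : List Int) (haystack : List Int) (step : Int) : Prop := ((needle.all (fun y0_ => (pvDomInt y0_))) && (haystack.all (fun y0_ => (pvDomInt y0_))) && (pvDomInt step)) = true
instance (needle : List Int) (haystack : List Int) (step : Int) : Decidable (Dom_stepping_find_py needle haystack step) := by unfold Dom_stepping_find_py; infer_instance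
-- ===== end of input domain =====

-- B performs the same offset checks by loop interchange (an offset-by-offset sweep over a
-- candidate mask) instead of A's per-start inner scan with early break; same cost, no speed claim.

-- ===== PORT A =====
-- inner loop of A: 'for pos in range(...): if mismatch: found_match = False; break'
def aMatch (needle : List Int) (haystack : List Int) (start_pos : Int) : List Int → Bool
  | [] => true
  | pos :: rest =>
      if PySem.List.pyGet? haystack (start_pos + pos) ≠ PySem.List.pyGet? needle pos then false
      else aMatch needle haystack start_pos rest

def stepping_find_py (needle : List Int) (haystack : List Int) (step : Int) : List Int :=
  (PySem.List.pyRange 0 ((haystack.length : Int) - (needle.length : Int) + 1) 1).foldl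
    (fun acc start_pos =>
      if aMatch needle haystack start_pos (PySem.List.pyRange 0 (needle.length : Int) step) then
        acc ++ [start_pos]
      else acc) []

-- ===== PORT B =====
def stepping_find_py_alt (needle : List Int) (haystack : List Int) (step : Int) : List Int :=
  let ok0 := List.replicate ((haystack.length : Int) - (needle.length : Int) + 1).toNat true
  if ok0.isEmpty then []
  else
    let ok := (PySem.List.pyRange 0 (needle.length : Int) step).foldl
      (fun ok p =>
        let c := PySem.List.pyGet? needle p
        (PySem.List.enumerate ok).map
          (fun sg => sg.2 && (PySem.List.pyGet? haystack (sg.1 + p) == c)))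
      ok0
    (PySem.List.enumerate ok).foldl
      (fun acc sg => if sg.2 then acc ++ [sg.1] else acc) []

-- ===== PRECONDITION & SPEC =====
-- Pre_ excludes exactly the inputs where Python A raises ValueError (range step 0 reached):
-- step = 0 with at least one candidate start position. B raises there too.
def Pre_stepping_find_py (needle : List Int) (haystack : List Int) (step : Int) : Prop :=
  step ≠ 0 ∨ (haystack.length : Int) < (needle.length : Int)
instance (needle : List Int) (haystack : List Int) (step : Int) : Decidable (Pre_stepping_find_py needle haystack step) := by unfold Pre_stepping_find_py; infer_instance
def pvWitness_stepping_find_py : List Int × List Int × Int := ([1, 2], [0, 1, 2, 1, 3, 2], 1)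

def Spec_stepping_find_py (needle : List Int) (haystack : List Int) (step : Int) (out : List Int) : Prop := out = stepping_find_py_alt needle haystack step
instance (needle : List Int) (haystack : List Int) (step : Int) (out : List Int) : Decidable (Spec_stepping_find_py needle haystack step out) := by unfold Spec_stepping_find_py; infer_instance

-- ===== CLAIM (what is proved, stated in full; the proofs are below) =====
def Claim_equal_stepping_find_py : Prop := ∀ (needle : List Int) (haystack : List Int) (step : Int), Dom_stepping_find_py needle haystack step → Pre_stepping_find_py needle haystack step → Spec_stepping_find_py needle haystack step (stepping_find_py needle haystack step)

-- ===== LEMMAS AND PROOFS =====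

theorem aMatch_eq_all (needle haystack : List Int) (s : Int) (R : List Int) :
    aMatch needle haystack s R
      = R.all (fun p => PySem.List.pyGet? haystack (s + p) == PySem.List.pyGet? needle p) := by
  induction R with
  | nil => rfl
  | cons p rest ih =>
      simp only [aMatch, List.all_cons, ih]
      by_cases h : PySem.List.pyGet? haystack (s + p) = PySem.List.pyGet? needle p <;>
        simp [h]


theorem enum_map_range (g : Int → Bool) (k : Nat) :
    PySem.List.enumerate ((PySem.List.pyRange 0 (k : Int) 1).map g) 0
      = (PySem.List.pyRange 0 (k : Int) 1).map (fun j => (j, g j)) := by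
  rw [PySem.List.enumerate_eq_map_pyRange _ true]
  have hlen : PySem.List.len ((PySem.List.pyRange 0 (k : Int) 1).map g) = (k : Int) := by
    simp [PySem.List.length_pyRange_one]
  rw [hlen]
  apply List.map_congr_left
  intro j hj
  rw [PySem.List.mem_pyRange_one] at hj
  rw [PySem.List.pyGetD_map_pyRange_of_nonneg g (k : Int) j true hj.1 hj.2]

theorem mask_step (needle haystack : List Int) (p : Int) (k : Nat) (g : Int → Bool) :
    (let c := PySem.List.pyGet? needle p
     (PySem.List.enumerate ((PySem.List.pyRange 0 (k : Int) 1).map g)).map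
          (fun sg => sg.2 && (PySem.List.pyGet? haystack (sg.1 + p) == c)))
    = (PySem.List.pyRange 0 (k : Int) 1).map
        (fun s => g s && (PySem.List.pyGet? haystack (s + p) == PySem.List.pyGet? needle p)) := by
  show ((PySem.List.enumerate ((PySem.List.pyRange 0 (k : Int) 1).map g)).map
          (fun sg => sg.2 && (PySem.List.pyGet? haystack (sg.1 + p) == PySem.List.pyGet? needle p)))
      = _
  rw [enum_map_range, List.map_map]
  rfl

theorem mask_fold (needle haystack : List Int) (R : List Int) (k : Nat) (g : Int → Bool) :
    R.foldl
      (fun (ok : List Bool) (p : Int) =>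
        let c := PySem.List.pyGet? needle p
        (PySem.List.enumerate ok).map
          (fun sg => sg.2 && (PySem.List.pyGet? haystack (sg.1 + p) == c)))
      ((PySem.List.pyRange 0 (k : Int) 1).map g)
    = (PySem.List.pyRange 0 (k : Int) 1).map
        (fun s => g s && R.all (fun p => PySem.List.pyGet? haystack (s + p) == PySem.List.pyGet? needle p)) := by
  induction R generalizing g with
  | nil => simp
  | cons p R ih =>
      rw [List.foldl_cons, mask_step needle haystack p k g, ih]
      apply List.map_congr_left
      intro s _
      simp [Bool.and_assoc]

theorem stepping_find_py_spec : Claim_equal_stepping_find_py := by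
  intro needle haystack step _ _
  unfold Spec_stepping_find_py stepping_find_py stepping_find_py_alt
  have hrange : PySem.List.pyRange 0 ((haystack.length : Int) - (needle.length : Int) + 1) 1
      = PySem.List.pyRange 0 ((((haystack.length : Int) - (needle.length : Int) + 1).toNat : Int)) 1 := by
    rw [PySem.List.pyRange_one, PySem.List.pyRange_one]
    have h : ((haystack.length : Int) - (needle.length : Int) + 1 - 0).toNat
        = (((((haystack.length : Int) - (needle.length : Int) + 1).toNat : Int)) - 0).toNat := by
      omega
    rw [h]
  by_cases hk : (List.replicate ((haystack.length : Int) - (needle.length : Int) + 1).toNat true).isEmpty = true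
  · have h0 : ((haystack.length : Int) - (needle.length : Int) + 1).toNat = 0 := by
      simpa using hk
    rw [if_pos hk, hrange, h0]
    simp
  · have hrep : List.replicate ((haystack.length : Int) - (needle.length : Int) + 1).toNat true
        = (PySem.List.pyRange 0 ((((haystack.length : Int) - (needle.length : Int) + 1).toNat : Int)) 1).map
            (fun _ => true) := by
      rw [List.map_const', PySem.List.length_pyRange_one]
      congr 1
    rw [if_neg hk, hrep]
    rw [mask_fold]
    simp only [enum_map_range, List.foldl_map]
    rw [hrange]
    simp only [aMatch_eq_all]
    rw [PySem.List.foldl_append_if_eq_filter, PySem.List.foldl_append_if_eq_filter]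
    simp only [List.nil_append]
    exact List.filter_congr (fun x _ => by simp)
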